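-- pv_equiv track=rewrite | github.com/zsh20070718/cs336 | assignment-1/cs336_basics/chat.py | trailing_same_id_run
-- ===== SOURCE A (Python) =====
-- def trailing_same_id_run(ids: list[int]) -> int:
--     if not ids:
--         return 0
--     last = ids[-1]
--     run = 0
--     for i in range(len(ids) - 1, -1, -1):
--         if ids[i] == last:
--             run += 1
--         else:
--             break
--     return run
-- ===== SOURCE B (Python) =====
-- def trailing_same_id_run(ids: list[int]) -> int:
--     run = 0
--     prev = None
--     for x in ids:
--         if prev is not None and x == prev:
--             run += 1
--         else:
--             run = 1
--         prev = x
--     return run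
-- ===== Notes on version B (the rewrite author's own statement) =====
-- stated objective: alternative
-- what changed: Replaces A's backward index loop with early exit (last element, descending range, break) by a single forward fold that maintains (previous value, current run length) and returns the final run.
import Mathlib
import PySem

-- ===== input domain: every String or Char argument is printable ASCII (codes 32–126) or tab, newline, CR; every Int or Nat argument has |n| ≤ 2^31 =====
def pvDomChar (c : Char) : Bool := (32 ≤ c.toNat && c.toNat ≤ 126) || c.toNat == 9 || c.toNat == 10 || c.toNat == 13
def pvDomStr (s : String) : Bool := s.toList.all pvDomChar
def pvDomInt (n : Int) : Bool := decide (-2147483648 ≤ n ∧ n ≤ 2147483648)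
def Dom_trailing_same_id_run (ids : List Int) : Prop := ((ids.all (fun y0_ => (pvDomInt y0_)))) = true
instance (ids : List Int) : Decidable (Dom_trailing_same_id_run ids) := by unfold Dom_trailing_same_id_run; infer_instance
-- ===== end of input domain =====

-- B replaces A's backward early-exit index loop by a single forward fold carrying (previous value, current run); return value equivalence, no side effects involved.

-- ===== PORT A =====
-- A's 'for i in range(len(ids)-1,-1,-1)' loop with break: recursion over the index list.
def pvALoop (ids : List Int) (last : Int) : List Int → Int → Int
  | [], run => run
  | i :: rest, run =>
    match PySem.List.pyGet? ids i with
    | some v => if v = last then pvALoop ids last rest (run + 1) else run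
    | none => run   -- unreachable: indices produced by range are in bounds

def trailing_same_id_run (ids : List Int) : Int :=
  if ids = [] then 0
  else
    match PySem.List.pyGet? ids (-1) with
    | some last => pvALoop ids last (PySem.List.pyRange (PySem.List.len ids - 1) (-1) (-1)) 0
    | none => 0   -- unreachable: ids nonempty

-- ===== PORT B =====
def pvBStep (st : Option Int × Int) (x : Int) : Option Int × Int :=
  if st.1 = some x then (some x, st.2 + 1) else (some x, 1)

def trailing_same_id_run_alt (ids : List Int) : Int :=
  (ids.foldl pvBStep (none, 0)).2

-- ===== PRECONDITION & SPEC =====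
def Spec_trailing_same_id_run (ids : List Int) (out : Int) : Prop := out = trailing_same_id_run_alt ids
instance (ids : List Int) (out : Int) : Decidable (Spec_trailing_same_id_run ids out) := by unfold Spec_trailing_same_id_run; infer_instance

-- ===== CLAIM (what is proved, stated in full; the proofs are below) =====
def Claim_equal_trailing_same_id_run : Prop := ∀ (ids : List Int), Dom_trailing_same_id_run ids → Spec_trailing_same_id_run ids (trailing_same_id_run ids)

-- ===== LEMMAS AND PROOFS =====

-- common reference value: 1 + length of the run of elements equal to a at the head's tail, on the reversed list
def pvRunRev : List Int → Int
  | [] => 0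
  | a :: t => 1 + ((t.takeWhile (fun y => y = a)).length : Int)

-- B invariant
theorem pvB_inv (ids : List Int) :
    ids.foldl pvBStep (none, 0) = (ids.getLast?, pvRunRev ids.reverse) := by
  induction ids using List.reverseRecOn with
  | nil => rfl
  | append_singleton xs x ih =>
    rw [List.foldl_append, ih]
    simp only [List.foldl, pvBStep, List.getLast?_append, List.reverse_append,
      List.reverse_cons, List.reverse_nil, List.nil_append, List.cons_append,
      List.getLast?_singleton]
    rcases hx : xs.getLast? with _ | y
    · have : xs = [] := List.getLast?_eq_none_iff.mp hx
      subst this; simp [pvRunRev]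
    · obtain ⟨ys, hys⟩ := List.getLast?_eq_some_iff.mp hx
      subst hys
      by_cases hxy : y = x
      · subst hxy
        simp only [pvRunRev]
        simp
        ring
      · have hne : (some y : Option Int) ≠ some x := by simpa using hxy
        simp only [List.reverse_append, List.reverse_singleton, List.singleton_append]
        simp [pvRunRev, List.takeWhile, hxy, hne]

-- A's loop over a list of values (fetched through pyGet?) counts the matching prefix
theorem pvALoop_vals (ids : List Int) (last : Int) :
    ∀ (idxs vals : List Int) (run : Int),
      idxs.map (PySem.List.pyGet? ids) = vals.map some →
      pvALoop ids last idxs run = run + ((vals.takeWhile (fun y => y = last)).length : Int) := by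
  intro idxs
  induction idxs with
  | nil =>
    intro vals run h
    cases vals with
    | nil => simp [pvALoop]
    | cons v t => simp at h
  | cons i rest ih =>
    intro vals run h
    cases vals with
    | nil => simp at h
    | cons v t =>
      simp only [List.map_cons, List.cons.injEq] at h
      obtain ⟨h1, h2⟩ := h
      simp only [pvALoop, h1]
      by_cases hv : v = last
      · subst hv
        rw [if_pos rfl, ih t (run + 1) h2]
        simp [List.takeWhile]
        ring
      · rw [if_neg hv]
        simp [List.takeWhile, hv]

-- the countdown index list fetches exactly the reversed list
theorem pvRange_fetch (ids : List Int) :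
    (PySem.List.pyRange (PySem.List.len ids - 1) (-1) (-1)).map (PySem.List.pyGet? ids)
      = ids.reverse.map some := by
  rw [PySem.List.pyRange_neg_one]
  have hn : ((PySem.List.len ids - 1) - (-1)).toNat = ids.length := by
    simp [PySem.List.len_eq]
  rw [hn, List.map_map]
  apply List.ext_getElem
  · simp
  · intro j hj hj'
    simp only [List.getElem_map, List.getElem_range, Function.comp_apply,
      List.getElem_reverse]
    have hjlen : j < ids.length := by simpa using hj
    have hidx : (PySem.List.len ids - 1 - (j : Int)) = ((ids.length - 1 - j : Nat) : Int) := by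
      simp [PySem.List.len_eq]; omega
    rw [hidx, PySem.List.pyGet?_natCast]
    rw [List.getElem?_eq_getElem (by omega)]

theorem pvA_eq_runRev (ids : List Int) :
    trailing_same_id_run ids = pvRunRev ids.reverse := by
  unfold trailing_same_id_run
  cases hids : ids with
  | nil => simp [pvRunRev]
  | cons a t =>
    rw [if_neg (by simp)]
    rw [PySem.List.pyGet?_neg_one]
    rcases (a :: t).eq_nil_or_concat with h0 | ⟨ys, y, hys⟩
    · simp at h0
    rw [hys, List.concat_eq_append]
    rw [List.getLast?_concat]
    have hfetch := pvRange_fetch (ys ++ [y])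
    have hrev : (ys ++ [y]).reverse = y :: ys.reverse := by simp
    rw [hrev] at hfetch
    show pvALoop (ys ++ [y]) y (PySem.List.pyRange (PySem.List.len (ys ++ [y]) - 1) (-1) (-1)) 0 = _
    rw [pvALoop_vals (ys ++ [y]) y (PySem.List.pyRange (PySem.List.len (ys ++ [y]) - 1) (-1) (-1)) (y :: ys.reverse) 0 hfetch]
    simp [pvRunRev, hrev, List.takeWhile]
    omega

-- ===== VERDICT (by name: the statement is the Claim_ definition above) =====
theorem trailing_same_id_run_spec : Claim_equal_trailing_same_id_run := by
  intro ids _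
  unfold Spec_trailing_same_id_run trailing_same_id_run_alt
  rw [pvB_inv, pvA_eq_runRev]
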